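-- pv_equiv track=rewrite | github.com/isi-vista/VistaOCR | src/textutils.py | form_tokenized_words
-- ===== SOURCE A (Python) =====
-- def form_tokenized_words(chars, with_spaces=False):
--     punctuations = {"u002e", "u002c", "u003b", "u0027", "u0022", "u002f", "u0021", "u0028", "u0029", "u005b", "u005d", "u003c", "u003e",
--                    "u002d", "u005f", "u007b", "u007d", "u0024", "u0025", "u0023", "u0026", "u060c", "u201d", "u060d", "u060f", "u061f",
--                    "u066d", "ufd3e", "ufd3f", "u061e", "u066a", "u066b", "u066c", "u002a", "u002b", "u003a", "u003d", "u005e", "u0060", "u007c", "u007e"}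
--     digits = {
--         "u0660", "u0661", "u0662", "u0663", "u0664", "u0665", "u0666", "u0667", "u0668", "u0669", "u0030", "u0031",
--         "u0032", "u0033", "u0034", "u0035", "u0036", "u0037", "u0038", "u0039"
--     }
--
--     words = []
--     start_idx = 0
--     for i in range(len(chars)):
--         if chars[i] == 'u0020':  # Space denotes new word
--             if start_idx != i:
--                 words.append('_'.join(chars[start_idx:i]))
--
--                 if with_spaces:
--                     words.append("u0020")
--             start_idx = i + 1
--             continue
--         if chars[i] in punctuations or chars[i] in digits:
--             if start_idx != i:
--                 words.append('_'.join(chars[start_idx:i]))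
--             words.append(chars[i])
--             start_idx = i + 1
--             continue
--         if i == len(chars) - 1:
--             # At end of line, so just toss remaining line into word array
--             if start_idx == i:
--                 words.append(chars[start_idx])
--             else:
--                 words.append('_'.join(chars[start_idx:]))
--
--     return words
-- ===== SOURCE B (Python) =====
-- def form_tokenized_words(chars, with_spaces=False):
--     punctuations = {"u002e", "u002c", "u003b", "u0027", "u0022", "u002f", "u0021", "u0028", "u0029", "u005b", "u005d", "u003c", "u003e",
--                    "u002d", "u005f", "u007b", "u007d", "u0024", "u0025", "u0023", "u0026", "u060c", "u201d", "u060d", "u060f", "u061f",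
--                    "u066d", "ufd3e", "ufd3f", "u061e", "u066a", "u066b", "u066c", "u002a", "u002b", "u003a", "u003d", "u005e", "u0060", "u007c", "u007e"}
--     digits = {
--         "u0660", "u0661", "u0662", "u0663", "u0664", "u0665", "u0666", "u0667", "u0668", "u0669", "u0030", "u0031",
--         "u0032", "u0033", "u0034", "u0035", "u0036", "u0037", "u0038", "u0039"
--     }
--
--     words = []
--     cur = []
--     for c in chars:
--         if c == 'u0020':
--             if cur:
--                 words.append('_'.join(cur))
--                 if with_spaces:
--                     words.append('u0020')
--                 cur = []
--         elif c in punctuations or c in digits: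
--             if cur:
--                 words.append('_'.join(cur))
--                 cur = []
--             words.append(c)
--         else:
--             cur.append(c)
--     if cur:
--         words.append('_'.join(cur))
--     return words
-- ===== Notes on version B (the rewrite author's own statement) =====
-- stated objective: simpler
-- what changed: Replaces A's start_idx/slice bookkeeping over indices (with its i == len-1 end-of-line special case) by a direct loop over the characters with a current-word accumulator flushed once after the loop.
import Mathlib
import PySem

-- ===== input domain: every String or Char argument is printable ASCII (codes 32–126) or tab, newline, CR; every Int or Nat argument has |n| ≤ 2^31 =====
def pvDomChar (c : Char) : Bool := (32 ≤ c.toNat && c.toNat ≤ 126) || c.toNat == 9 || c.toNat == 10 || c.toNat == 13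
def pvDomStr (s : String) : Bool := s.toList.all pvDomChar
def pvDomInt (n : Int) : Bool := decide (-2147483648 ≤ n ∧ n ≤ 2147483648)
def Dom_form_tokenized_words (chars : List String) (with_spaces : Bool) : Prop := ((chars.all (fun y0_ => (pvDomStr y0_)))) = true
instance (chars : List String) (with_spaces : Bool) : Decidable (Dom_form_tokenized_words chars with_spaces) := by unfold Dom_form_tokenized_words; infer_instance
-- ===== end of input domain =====

-- B replaces A's start_idx/slice bookkeeping (with its i == len-1 end-of-line special case)
-- by a plain current-word accumulator flushed once after the loop: simpler decomposition, same values.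

-- ===== PORT A =====
-- the two constant sets of A (literal)
def pvPunct : List String := ["u002e", "u002c", "u003b", "u0027", "u0022", "u002f", "u0021", "u0028", "u0029", "u005b", "u005d", "u003c", "u003e",
  "u002d", "u005f", "u007b", "u007d", "u0024", "u0025", "u0023", "u0026", "u060c", "u201d", "u060d", "u060f", "u061f",
  "u066d", "ufd3e", "ufd3f", "u061e", "u066a", "u066b", "u066c", "u002a", "u002b", "u003a", "u003d", "u005e", "u0060", "u007c", "u007e"]
def pvDigits : List String := ["u0660", "u0661", "u0662", "u0663", "u0664", "u0665", "u0666", "u0667", "u0668", "u0669", "u0030", "u0031",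
  "u0032", "u0033", "u0034", "u0035", "u0036", "u0037", "u0038", "u0039"]

-- one iteration of A's for-loop over i; state = (words, start_idx).
-- chars[start_idx:i] is (chars.drop start_idx).take (i - start_idx): exact, since 0 ≤ start_idx ≤ i here;
-- chars[i] is chars.getD i "" : exact since i ∈ range(len(chars)).
def aStep (chars : List String) (with_spaces : Bool) (st : List String × Nat) (i : Nat) : List String × Nat :=
  let c := chars.getD i ""
  if c = "u0020" then
    (if st.2 ≠ i then
        (st.1 ++ ["_".intercalate ((chars.drop st.2).take (i - st.2))]) ++
          (if with_spaces then ["u0020"] else [])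
      else st.1, i + 1)
  else if pvPunct.contains c || pvDigits.contains c then
    ((if st.2 ≠ i then st.1 ++ ["_".intercalate ((chars.drop st.2).take (i - st.2))] else st.1) ++ [c], i + 1)
  else if i = chars.length - 1 then
    (if st.2 = i then st.1 ++ [chars.getD st.2 ""] else st.1 ++ ["_".intercalate (chars.drop st.2)], st.2)
  else st

def form_tokenized_words (chars : List String) (with_spaces : Bool) : List String :=
  ((List.range chars.length).foldl (aStep chars with_spaces) ([], 0)).1

-- ===== PORT B =====
-- B's loop over the chars themselves; state = (words, cur); trailing flush after the loop.
def bLoop (with_spaces : Bool) : List String → List String → List String → List String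
  | words, cur, [] => if cur ≠ [] then words ++ ["_".intercalate cur] else words
  | words, cur, c :: rest =>
    if c = "u0020" then
      bLoop with_spaces
        (if cur ≠ [] then (words ++ ["_".intercalate cur]) ++ (if with_spaces then ["u0020"] else []) else words)
        [] rest
    else if pvPunct.contains c || pvDigits.contains c then
      bLoop with_spaces ((if cur ≠ [] then words ++ ["_".intercalate cur] else words) ++ [c]) [] rest
    else
      bLoop with_spaces words (cur ++ [c]) rest

def form_tokenized_words_alt (chars : List String) (with_spaces : Bool) : List String :=
  bLoop with_spaces [] [] chars

-- ===== PRECONDITION & SPEC =====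
def Spec_form_tokenized_words (chars : List String) (with_spaces : Bool) (out : List String) : Prop := out = form_tokenized_words_alt chars with_spaces
instance (chars : List String) (with_spaces : Bool) (out : List String) : Decidable (Spec_form_tokenized_words chars with_spaces out) := by unfold Spec_form_tokenized_words; infer_instance

-- ===== CLAIM (what is proved, stated in full; the proofs are below) =====
def Claim_equal_form_tokenized_words : Prop := ∀ (chars : List String) (with_spaces : Bool), Dom_form_tokenized_words chars with_spaces → Spec_form_tokenized_words chars with_spaces (form_tokenized_words chars with_spaces)

-- ===== LEMMAS AND PROOFS =====

-- the buffered current word at position i with word start s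
lemma cur_ne_nil_iff (chars : List String) (s i : Nat) (hsi : s ≤ i) (hi : i < chars.length) :
    ((chars.drop s).take (i - s) ≠ []) ↔ s ≠ i := by
  constructor
  · rintro h rfl; simp at h
  · intro h
    have : 0 < i - s := by omega
    have hlen : ((chars.drop s).take (i - s)).length = i - s := by
      simp [List.length_take, List.length_drop]; omega
    intro hnil; rw [hnil] at hlen; simp at hlen; omega

lemma cur_snoc (chars : List String) (s i : Nat) (hsi : s ≤ i) (hi : i < chars.length) :
    (chars.drop s).take (i + 1 - s) = (chars.drop s).take (i - s) ++ [chars.getD i ""] := by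
  have h1 : i + 1 - s = (i - s) + 1 := by omega
  have h2 : i - s < (chars.drop s).length := by rw [List.length_drop]; omega
  rw [h1, List.take_add_one]
  congr 1
  rw [List.getElem?_eq_getElem h2]
  have h3 : s + (i - s) < chars.length := by omega
  simp only [List.getElem_drop, Option.toList_some, List.cons.injEq, and_true]
  rw [List.getD_eq_getElem?_getD, List.getElem?_eq_getElem hi]
  simp only [Option.getD_some]
  congr 1; omega

lemma drop_last (chars : List String) (i : Nat) (h : i + 1 = chars.length) :
    chars.drop i = [chars.getD i ""] := by
  have hi : i < chars.length := by omega
  rw [List.drop_eq_getElem_cons hi]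
  have : chars.drop (i + 1) = [] := by simp [List.drop_eq_nil_iff]; omega
  rw [this]
  simp [List.getD_eq_getElem?_getD, List.getElem?_eq_getElem hi]

lemma drop_split (chars : List String) (s i : Nat) (hsi : s ≤ i) :
    chars.drop s = (chars.drop s).take (i - s) ++ chars.drop i := by
  conv_lhs => rw [← List.take_append_drop (i - s) (chars.drop s)]
  congr 1
  rw [List.drop_drop]
  congr 1; omega

-- main loop correspondence: A's fold from index i (with k+1 indices left, word start s)
-- equals B's loop on the remaining chars with the buffered word as cur.
lemma loop_corr (chars : List String) (ws : Bool) :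
    ∀ (k i s : Nat) (words : List String), i + (k + 1) = chars.length → s ≤ i →
      ((List.range' i (k + 1)).foldl (aStep chars ws) (words, s)).1
        = bLoop ws words ((chars.drop s).take (i - s)) (chars.drop i) := by
  intro k
  induction k with
  | zero =>
    intro i s words hlen hsi
    have hi : i < chars.length := by omega
    rw [drop_last chars i (by omega)]
    simp only [Nat.zero_add, List.range'_one, List.foldl_cons, List.foldl_nil]
    unfold aStep
    set c := chars.getD i "" with hc
    by_cases hsp : c = "u0020"
    · simp only [hsp, if_pos rfl, bLoop, if_pos rfl]
      by_cases hse : s = i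
      · subst hse
        simp only [ne_eq, not_true_eq_false, ite_false, if_false]
        simp [bLoop]
      · rw [if_pos hse, if_pos ((cur_ne_nil_iff chars s i hsi hi).2 hse)]
        simp [bLoop]
    · rw [if_neg hsp]
      by_cases hpd : (pvPunct.contains c || pvDigits.contains c) = true
      · rw [if_pos hpd]
        simp only [bLoop, if_neg hsp, if_pos hpd]
        by_cases hse : s = i
        · subst hse; simp [bLoop]
        · rw [if_pos hse, if_pos ((cur_ne_nil_iff chars s i hsi hi).2 hse)]
          simp [bLoop]
      · rw [if_neg hpd, if_pos (by omega : i = chars.length - 1)]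
        simp only [bLoop, if_neg hsp, if_neg hpd]
        by_cases hse : s = i
        · subst hse
          simp [bLoop]
          rfl
        · rw [if_neg hse]
          have hcur : (chars.drop s).take (i - s) ++ [c] = chars.drop s := by
            rw [hc, ← drop_last chars i (by omega)]
            exact (drop_split chars s i hsi).symm
          simp only [bLoop, hcur]
          have : chars.drop s ≠ [] := by
            intro hnil
            have := congrArg List.length hnil
            simp [List.length_drop] at this; omega
          rw [if_pos this]
  | succ k ih =>
    intro i s words hlen hsi
    have hi : i < chars.length := by omega
    have hdropi : chars.drop i = chars.getD i "" :: chars.drop (i + 1) := by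
      rw [List.drop_eq_getElem_cons hi]
      simp [List.getD_eq_getElem?_getD, List.getElem?_eq_getElem hi]
    rw [List.range'_succ, List.foldl_cons, hdropi]
    set c := chars.getD i "" with hc
    by_cases hsp : c = "u0020"
    · have hstep : aStep chars ws (words, s) i =
        (if s ≠ i then (words ++ ["_".intercalate ((chars.drop s).take (i - s))]) ++
          (if ws then ["u0020"] else []) else words, i + 1) := by
        simp only [aStep, ← hc, hsp]; simp
      rw [hstep, ih (i + 1) (i + 1) _ (by omega) (le_refl _)]
      simp only [bLoop, if_pos hsp, Nat.sub_self, List.take_zero]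
      by_cases hse : s = i
      · subst hse
        simp
      · rw [if_pos hse, if_pos ((cur_ne_nil_iff chars s i hsi hi).2 hse)]
    · by_cases hpd : (pvPunct.contains c || pvDigits.contains c) = true
      · have hstep : aStep chars ws (words, s) i =
          ((if s ≠ i then words ++ ["_".intercalate ((chars.drop s).take (i - s))] else words) ++ [c], i + 1) := by
          simp only [aStep, ← hc, if_neg hsp, hpd]; simp
        rw [hstep, ih (i + 1) (i + 1) _ (by omega) (le_refl _)]
        simp only [bLoop, if_neg hsp, hpd, if_true, Nat.sub_self, List.take_zero]
        by_cases hse : s = i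
        · subst hse; simp
        · rw [if_pos hse, if_pos ((cur_ne_nil_iff chars s i hsi hi).2 hse)]
      · have hstep : aStep chars ws (words, s) i = (words, s) := by
          simp only [aStep, ← hc, if_neg hsp, hpd]
          rw [if_neg (by omega : ¬ i = chars.length - 1)]
          simp
        rw [hstep, ih (i + 1) s _ (by omega) (by omega)]
        simp only [bLoop, if_neg hsp, hpd]
        rw [cur_snoc chars s i hsi hi, ← hc]
        simp

-- ===== VERDICT (by name: the statement is the Claim_ definition above) =====
theorem form_tokenized_words_spec : Claim_equal_form_tokenized_words := by
  intro chars ws _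
  unfold Spec_form_tokenized_words form_tokenized_words form_tokenized_words_alt
  cases hchars : chars with
  | nil => simp [bLoop]
  | cons x xs =>
    rw [← hchars]
    have hlen : chars.length = xs.length + 1 := by rw [hchars]; simp
    rw [hlen, List.range_eq_range']
    rw [loop_corr chars ws xs.length 0 0 [] (by omega) (le_refl 0)]
    simp
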